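-- pv_equiv track=rewrite | github.com/trentzz/kam | docs/benchmarking/sv/scripts/make_monitoring_vcf.py | _deletion_key_from_min
-- ===== SOURCE A (Python) =====
-- def _deletion_key_from_min(chrom, target_start, indel_start, ref_seq, del_seq_str):
--     del_seq = list(del_seq_str)
--     anchor_pos = indel_start - 1
--
--     # Left-normalise: while last base of del_seq matches the base at anchor_pos.
--     while anchor_pos > 0 and del_seq and ref_seq[anchor_pos] == del_seq[-1]:
--         last = del_seq.pop()
--         del_seq.insert(0, last)
--         anchor_pos -= 1
--
--     if anchor_pos >= 0:
--         anchor = ref_seq[anchor_pos]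
--         ref_allele = anchor + ''.join(del_seq)
--         alt_allele = anchor
--         genomic_pos = target_start + anchor_pos + 1  # 1-based VCF
--         return chrom, genomic_pos, ref_allele, alt_allele
--     else:
--         genomic_pos = target_start + indel_start + 1
--         return chrom, genomic_pos, ''.join(del_seq), ''
-- ===== SOURCE B (Python) =====
-- def _deletion_key_from_min(chrom, target_start, indel_start, ref_seq, del_seq_str):
--     # Count-then-rotate: find the rotation count k first, then do one slice rotation.
--     m = len(del_seq_str)
--     anchor_pos = indel_start - 1
--     k = 0
--     while anchor_pos - k > 0 and m > 0 and ref_seq[anchor_pos - k] == del_seq_str[(m - 1 - k) % m]: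
--         k += 1
--     anchor_pos -= k
--     rot = del_seq_str[m - k % m:] + del_seq_str[:m - k % m] if m else ''
--     if anchor_pos >= 0:
--         anchor = ref_seq[anchor_pos]
--         return chrom, target_start + anchor_pos + 1, anchor + rot, anchor
--     else:
--         return chrom, target_start + indel_start + 1, rot, ''
-- ===== Notes on version B (the rewrite author's own statement) =====
-- stated objective: alternative
-- what changed: B replaces A's mutate-per-step loop (pop last, insert at front on every iteration) by first counting the rotation k with a pure scan over the original string and then performing a single slice rotation del[m-k%m:]+del[:m-k%m]; this avoids A's O(m) list mutation per loop step.
import Mathlib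
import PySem

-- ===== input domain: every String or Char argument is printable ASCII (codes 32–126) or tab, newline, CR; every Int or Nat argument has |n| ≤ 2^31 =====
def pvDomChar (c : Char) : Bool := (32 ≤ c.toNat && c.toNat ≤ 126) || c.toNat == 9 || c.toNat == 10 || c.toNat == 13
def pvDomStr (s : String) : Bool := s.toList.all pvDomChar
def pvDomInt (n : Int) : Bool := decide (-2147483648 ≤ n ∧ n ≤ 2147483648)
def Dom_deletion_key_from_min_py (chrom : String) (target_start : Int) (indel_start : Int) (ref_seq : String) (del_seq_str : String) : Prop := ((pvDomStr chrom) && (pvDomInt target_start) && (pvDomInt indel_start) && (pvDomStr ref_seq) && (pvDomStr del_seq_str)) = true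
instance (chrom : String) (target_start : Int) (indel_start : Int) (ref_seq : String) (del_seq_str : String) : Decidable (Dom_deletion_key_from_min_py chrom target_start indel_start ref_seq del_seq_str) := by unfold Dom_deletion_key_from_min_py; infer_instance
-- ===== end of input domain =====

-- B counts the rotation first and rotates once by slicing, instead of mutating the list on every loop step; same return value on all of Pre_.


-- ===== PORT A =====
-- one loop step: last = del_seq.pop(); del_seq.insert(0, last)
def pvRotStep (ds : List Char) : List Char :=
  match ds.getLast? with
  | none => ds
  | some c => c :: ds.dropLast

-- the while loop; state (anchor_pos, del_seq); pyGet? = none (IndexError) stops (excluded by Pre_)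
def pvALoop (ref : List Char) (anchor : Int) (ds : List Char) : Int × List Char :=
  if h : 0 < anchor ∧ ds ≠ [] ∧ PySem.List.pyGet? ref anchor = PySem.List.pyGet? ds (-1) then
    pvALoop ref (anchor - 1) (pvRotStep ds)
  else (anchor, ds)
termination_by anchor.toNat
decreasing_by omega

def deletion_key_from_min_py (chrom : String) (target_start : Int) (indel_start : Int) (ref_seq : String) (del_seq_str : String) : String × Int × String × String :=
  let r := pvALoop ref_seq.toList (indel_start - 1) del_seq_str.toList
  let anchor_pos := r.1
  let ds := r.2
  if 0 ≤ anchor_pos then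
    match PySem.List.pyGet? ref_seq.toList anchor_pos with
    | some c => (chrom, target_start + anchor_pos + 1, String.mk (c :: ds), String.mk [c])
    | none => (chrom, 0, "", "")   -- IndexError: outside Pre_
  else (chrom, target_start + indel_start + 1, String.mk ds, "")

-- ===== PORT B =====
-- count the rotation k by a pure scan; state is just k
def pvBCount (ref del : List Char) (anchor : Int) (k : Nat) : Nat :=
  if h : 0 < anchor - (k : Int) ∧ 0 < del.length ∧
      PySem.List.pyGet? ref (anchor - (k : Int)) =
        PySem.List.pyGet? del (PySem.Int.mod ((del.length : Int) - 1 - (k : Int)) (del.length : Int)) then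
    pvBCount ref del anchor (k + 1)
  else k
termination_by (anchor - (k : Int)).toNat
decreasing_by omega

def deletion_key_from_min_py_alt (chrom : String) (target_start : Int) (indel_start : Int) (ref_seq : String) (del_seq_str : String) : String × Int × String × String :=
  let del := del_seq_str.toList
  let m := del.length
  let k := pvBCount ref_seq.toList del (indel_start - 1) 0
  let anchor_pos := indel_start - 1 - (k : Int)
  let rot : List Char :=
    if m = 0 then []
    else PySem.List.slice del (some ((m - k % m : Nat) : Int)) none ++
         PySem.List.slice del none (some ((m - k % m : Nat) : Int))
  if 0 ≤ anchor_pos then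
    match PySem.List.pyGet? ref_seq.toList anchor_pos with
    | some c => (chrom, target_start + anchor_pos + 1, String.mk (c :: rot), String.mk [c])
    | none => (chrom, 0, "", "")   -- IndexError: outside Pre_
  else (chrom, target_start + indel_start + 1, String.mk rot, "")

-- ===== PRECONDITION & SPEC =====
-- Pre_ excludes exactly the inputs where A raises IndexError (indel_start ≥ 1 and
-- indel_start - 1 ≥ len(ref_seq)); it admits every input on which A returns.
def Pre_deletion_key_from_min_py (chrom : String) (target_start : Int) (indel_start : Int) (ref_seq : String) (del_seq_str : String) : Prop :=
  indel_start ≤ 0 ∨ indel_start ≤ (ref_seq.toList.length : Int)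
instance (chrom : String) (target_start : Int) (indel_start : Int) (ref_seq : String) (del_seq_str : String) : Decidable (Pre_deletion_key_from_min_py chrom target_start indel_start ref_seq del_seq_str) := by unfold Pre_deletion_key_from_min_py; infer_instance

def pvWitness_deletion_key_from_min_py : String × Int × Int × String × String := ("chr1", 10, 2, "ACGT", "CG")

def Spec_deletion_key_from_min_py (chrom : String) (target_start : Int) (indel_start : Int) (ref_seq : String) (del_seq_str : String) (out : String × Int × String × String) : Prop := out = deletion_key_from_min_py_alt chrom target_start indel_start ref_seq del_seq_str
instance (chrom : String) (target_start : Int) (indel_start : Int) (ref_seq : String) (del_seq_str : String) (out : String × Int × String × String) : Decidable (Spec_deletion_key_from_min_py chrom target_start indel_start ref_seq del_seq_str out) := by unfold Spec_deletion_key_from_min_py; infer_instance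

-- ===== CLAIM (what is proved, stated in full; the proofs are below) =====
def Claim_equal_deletion_key_from_min_py : Prop := ∀ (chrom : String) (target_start : Int) (indel_start : Int) (ref_seq : String) (del_seq_str : String), Dom_deletion_key_from_min_py chrom target_start indel_start ref_seq del_seq_str → Pre_deletion_key_from_min_py chrom target_start indel_start ref_seq del_seq_str → Spec_deletion_key_from_min_py chrom target_start indel_start ref_seq del_seq_str (deletion_key_from_min_py chrom target_start indel_start ref_seq del_seq_str)

-- ===== LEMMAS AND PROOFS =====

-- iterated rotation (proof-side only)
def pvRot (k : Nat) (del : List Char) : List Char := pvRotStep^[k] del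

lemma pvRotStep_length (ds : List Char) : (pvRotStep ds).length = ds.length := by
  unfold pvRotStep
  cases h : ds.getLast? with
  | none => rfl
  | some c =>
    have hne : ds ≠ [] := by intro e; subst e; simp at h
    have : 0 < ds.length := List.length_pos_iff.mpr hne
    simp [List.length_dropLast]; omega

lemma rotStep_drop_take (del : List Char) (j : Nat) (hj1 : 1 ≤ j) (hjm : j ≤ del.length) :
    pvRotStep (del.drop j ++ del.take j) = del.drop (j - 1) ++ del.take (j - 1) := by
  have hjlt : j - 1 < del.length := by omega
  have hjj : j - 1 < j := by omega
  have htake_ne : del.take j ≠ [] := by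
    apply List.ne_nil_of_length_pos
    rw [List.length_take]
    omega
  have hlast : (del.drop j ++ del.take j).getLast? = some del[j - 1] := by
    rw [List.getLast?_append_of_ne_nil _ htake_ne, List.getLast?_eq_getElem?,
      List.length_take]
    have hmin : min j del.length = j := by omega
    rw [hmin, List.getElem?_take, if_pos hjj, List.getElem?_eq_getElem hjlt]
  have hdroplast : (del.drop j ++ del.take j).dropLast = del.drop j ++ del.take (j - 1) := by
    rw [List.dropLast_eq_take, List.take_append]
    have hlen : (del.drop j ++ del.take j).length = del.length := by
      rw [List.length_append, List.length_drop, List.length_take]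
      omega
    rw [hlen, List.length_drop]
    have h1 : (del.drop j).take (del.length - 1) = del.drop j := by
      apply List.take_of_length_le
      rw [List.length_drop]
      omega
    rw [h1, List.take_take]
    congr 1
    have hmin2 : min (del.length - 1 - (del.length - j)) j = j - 1 := by omega
    rw [hmin2]
  have hcons : del[j - 1] :: del.drop j = del.drop (j - 1) := by
    have h := List.getElem_cons_drop (as := del) (i := j - 1) hjlt
    have hjeq : j - 1 + 1 = j := by omega
    rw [hjeq] at h
    exact h
  unfold pvRotStep
  rw [hlast, hdroplast]
  show del[j - 1] :: (del.drop j ++ del.take (j - 1)) = _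
  rw [← List.cons_append, hcons]

lemma pvRot_eq {del : List Char} (hm : 0 < del.length) (k : Nat) :
    pvRot k (del : List Char) =
      del.drop (del.length - k % del.length) ++ del.take (del.length - k % del.length) := by
  induction k with
  | zero => simp [pvRot]
  | succ k ih =>
    have hstep : pvRot (k + 1) del = pvRotStep (pvRot k del) :=
      Function.iterate_succ_apply' _ _ _
    have hkm : k % del.length < del.length := Nat.mod_lt _ hm
    rw [hstep, ih, rotStep_drop_take del (del.length - k % del.length) (by omega) (by omega)]
    by_cases hcase : k % del.length = del.length - 1
    · have h0 : del.length - k % del.length - 1 = 0 := by omega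
      have hmod : (k + 1) % del.length = 0 := by
        have h1 : (k + 1) % del.length = (k % del.length + 1 % del.length) % del.length := by
          rw [Nat.add_mod]
        by_cases hm1 : del.length = 1
        · rw [hm1]
          exact Nat.mod_one _
        · have h2 : 1 % del.length = 1 := Nat.mod_eq_of_lt (by omega)
          rw [h1, h2, hcase]
          have h3 : del.length - 1 + 1 = del.length := by omega
          rw [h3, Nat.mod_self]
      rw [h0, hmod]
      simp
    · have hmod : (k + 1) % del.length = k % del.length + 1 := by
        have h1 : 1 % del.length = 1 := Nat.mod_eq_of_lt (by omega)
        have h2 : (k + 1) % del.length = (k % del.length + 1) % del.length := by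
          rw [Nat.add_mod, h1]
        rw [h2]
        exact Nat.mod_eq_of_lt (by omega)
      rw [hmod]
      have hsub : del.length - (k % del.length + 1) = del.length - k % del.length - 1 := by
        omega
      rw [hsub]

lemma pvRot_length (k : Nat) (del : List Char) : (pvRot k del).length = del.length := by
  induction k with
  | zero => rfl
  | succ k ih =>
    rw [pvRot, Function.iterate_succ_apply', ← pvRot, pvRotStep_length, ih]

lemma pvRot_getLast {del : List Char} (hm : 0 < del.length) (k : Nat) :
    (pvRot k (del : List Char)).getLast? = del[del.length - 1 - k % del.length]? := by
  rw [pvRot_eq hm k]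
  have hkm : k % del.length < del.length := Nat.mod_lt _ hm
  have hj1 : 1 ≤ del.length - k % del.length := by omega
  have hjm : del.length - k % del.length ≤ del.length := by omega
  have hjj : del.length - k % del.length - 1 < del.length - k % del.length := by omega
  have htake_ne : del.take (del.length - k % del.length) ≠ [] := by
    apply List.ne_nil_of_length_pos
    rw [List.length_take]
    omega
  rw [List.getLast?_append_of_ne_nil _ htake_ne, List.getLast?_eq_getElem?,
    List.length_take]
  have hmin : min (del.length - k % del.length) del.length = del.length - k % del.length := by
    omega
  rw [hmin, List.getElem?_take, if_pos hjj]
  congr 1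
  omega

lemma mod_index (m k : Nat) (hm : 0 < m) :
    PySem.Int.mod ((m : Int) - 1 - (k : Int)) (m : Int) = ((m - 1 - k % m : Nat) : Int) := by
  rw [PySem.Int.mod_eq_emod_of_pos (by exact_mod_cast hm)]
  have hkm : k % m < m := Nat.mod_lt _ hm
  have hk' : (k : Int) = (m : Int) * (k / m : Nat) + (k % m : Nat) := by
    have h := Nat.div_add_mod k m
    calc (k : Int) = ((m * (k / m) + k % m : Nat) : Int) := by rw [h]
      _ = _ := by push_cast; ring
  have hrw : (m : Int) - 1 - (k : Int) = ((m - 1 - k % m : Nat) : Int) - (m : Int) * (k / m : Nat) := by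
    rw [hk']
    push_cast
    omega
  rw [hrw, Int.sub_mul_emod_self_left]
  exact Int.emod_eq_of_lt (by omega) (by omega)

lemma cond_iff (ref del : List Char) (a : Int) (k : Nat) :
    (0 < a ∧ pvRot k del ≠ [] ∧ PySem.List.pyGet? ref a = PySem.List.pyGet? (pvRot k del) (-1)) ↔
    (0 < a ∧ 0 < del.length ∧ PySem.List.pyGet? ref a =
      PySem.List.pyGet? del (PySem.Int.mod ((del.length : Int) - 1 - (k : Int)) (del.length : Int))) := by
  by_cases hm : 0 < del.length
  · have hne : pvRot k del ≠ [] := by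
      apply List.ne_nil_of_length_pos
      rw [pvRot_length]
      omega
    rw [PySem.List.pyGet?_neg_one, pvRot_getLast hm k, mod_index del.length k hm,
      PySem.List.pyGet?_natCast]
    simp [hne, hm]
  · have hd : del = [] := List.eq_nil_of_length_eq_zero (by omega)
    subst hd
    have : pvRot k ([] : List Char) = [] := by
      have := pvRot_length k ([] : List Char)
      exact List.eq_nil_of_length_eq_zero (by simpa using this)
    simp [this]

lemma loop_corr (ref del : List Char) (a0 : Int) (k : Nat) :
    pvALoop ref (a0 - (k : Int)) (pvRot k del) =
      (a0 - (pvBCount ref del a0 k : Int), pvRot (pvBCount ref del a0 k) del) := by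
  fun_induction pvBCount ref del a0 k with
  | case1 k h ih =>
    rw [pvALoop, dif_pos ((cond_iff ref del (a0 - (k : Int)) k).mpr h)]
    have h1 : a0 - (k : Int) - 1 = a0 - ((k + 1 : Nat) : Int) := by push_cast; ring
    have h2 : pvRotStep (pvRot k del) = pvRot (k + 1) del :=
      (Function.iterate_succ_apply' _ _ _).symm
    rw [h1, h2]
    exact ih
  | case2 k h =>
    rw [pvALoop, dif_neg]
    intro hc
    exact h ((cond_iff ref del (a0 - (k : Int)) k).mp hc)

lemma pvRot_nil (k : Nat) : pvRot k ([] : List Char) = [] :=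
  List.eq_nil_of_length_eq_zero (by simpa using pvRot_length k [])

-- ===== VERDICT (by name: the statement is the Claim_ definition above) =====
theorem deletion_key_from_min_py_spec : Claim_equal_deletion_key_from_min_py := by
  intro chrom target_start indel_start ref_seq del_seq_str _hdom _hpre
  unfold Spec_deletion_key_from_min_py deletion_key_from_min_py deletion_key_from_min_py_alt
  have h0 := loop_corr ref_seq.toList del_seq_str.toList (indel_start - 1) 0
  simp only [Nat.cast_zero, sub_zero] at h0
  rw [show pvRot 0 del_seq_str.toList = del_seq_str.toList from rfl] at h0
  set K := pvBCount ref_seq.toList del_seq_str.toList (indel_start - 1) 0 with hK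
  set m := del_seq_str.toList.length with hm
  have hrot : (if m = 0 then ([] : List Char)
      else PySem.List.slice del_seq_str.toList (some ((m - K % m : Nat) : Int)) none ++
           PySem.List.slice del_seq_str.toList none (some ((m - K % m : Nat) : Int))) =
      pvRot K del_seq_str.toList := by
    by_cases hm0 : m = 0
    · rw [if_pos hm0]
      have : del_seq_str.toList = [] := List.eq_nil_of_length_eq_zero (by omega)
      rw [this, pvRot_nil]
    · rw [if_neg hm0, PySem.List.slice_from_natCast, PySem.List.slice_to_natCast,
        pvRot_eq (by omega) K]
  simp only [h0]
  rw [← hK, ← hm, hrot]
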